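-- pv_equiv track=rewrite | github.com/Adarshb2000/coding | LC1664.py | waysToMakeFair
-- ===== SOURCE A (Python) =====
-- from typing import List
--
-- def waysToMakeFair(nums: List[int]) -> int:
--     oddPrefix = [0]
--     evenPrefix = [0]
--     oddSum = 0
--     evenSum = 0
--     for index, num in enumerate(nums):
--         if index & 1:
--             oddPrefix.append(oddPrefix[-1] + num)
--             evenPrefix.append(evenPrefix[-1])
--             oddSum += num
--         else:
--             oddPrefix.append(oddPrefix[-1])
--             evenPrefix.append(evenPrefix[-1] + num)
--             evenSum += num
--
--     answer = 0
--     for index, num in enumerate(nums):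
--         currOddPre = oddPrefix[index]
--         currEvenPre = evenPrefix[index]
--         currOddSuf = oddSum - oddPrefix[index + 1]
--         currEvenSuf = evenSum - evenPrefix[index + 1]
--
--         if currOddPre + currEvenSuf == currEvenPre + currOddSuf:
--             answer += 1
--
--     return answer
-- ===== SOURCE B (Python) =====
-- from typing import List
--
-- def waysToMakeFair(nums: List[int]) -> int:
--     # Alternating-sum formulation: removing index i is fair
--     # iff 2*prefixAlt(i) + sign_i*nums[i] == totalAlt,
--     # where alt sums use sign (+1, -1, +1, ...) by position.
--     total = 0
--     sign = 1
--     for x in nums: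
--         total += sign * x
--         sign = -sign
--     answer = 0
--     p = 0
--     sign = 1
--     for x in nums:
--         if 2 * p + sign * x == total:
--             answer += 1
--         p += sign * x
--         sign = -sign
--     return answer
-- ===== Notes on version B (the rewrite author's own statement) =====
-- stated objective: alternative
-- what changed: Replaces A's even/odd prefix-sum arrays and per-index suffix reconstruction with a signed alternating-sum formulation: removal at i is fair iff 2*prefixAlt(i) + sign_i*nums[i] equals the total alternating sum, so B keeps one signed accumulator and no parity bookkeeping or arrays at all.
import Mathlib
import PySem

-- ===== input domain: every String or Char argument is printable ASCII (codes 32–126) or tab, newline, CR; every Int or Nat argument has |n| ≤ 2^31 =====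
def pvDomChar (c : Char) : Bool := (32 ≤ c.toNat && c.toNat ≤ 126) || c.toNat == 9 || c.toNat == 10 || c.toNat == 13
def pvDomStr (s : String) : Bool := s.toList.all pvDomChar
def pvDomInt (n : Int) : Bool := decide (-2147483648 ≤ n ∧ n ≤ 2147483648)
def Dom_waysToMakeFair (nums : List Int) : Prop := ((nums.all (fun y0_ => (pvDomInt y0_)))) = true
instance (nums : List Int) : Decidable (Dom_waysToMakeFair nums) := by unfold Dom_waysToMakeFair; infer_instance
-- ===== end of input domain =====

-- B replaces A's even/odd prefix arrays with one signed alternating-sum accumulator (no parity bookkeeping); return value proved equal.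

-- ===== PORT A =====
-- body of A's first for-loop (builds the prefix lists and the two totals)
def stepA1 (s : List Int × List Int × Int × Int) (ix : Int × Int) :
    List Int × List Int × Int × Int :=
  let op := s.1; let ep := s.2.1; let os := s.2.2.1; let es := s.2.2.2
  let index := ix.1; let num := ix.2
  if PySem.Int.band index 1 != 0 then
    (op ++ [PySem.List.pyGetD op (-1) 0 + num], ep ++ [PySem.List.pyGetD ep (-1) 0], os + num, es)
  else
    (op ++ [PySem.List.pyGetD op (-1) 0], ep ++ [PySem.List.pyGetD ep (-1) 0 + num], os, es + num)

-- body of A's second for-loop (pyGetD is exact here: every index used is in range)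
def stepA2 (op ep : List Int) (os es : Int) (answer : Int) (ix : Int × Int) : Int :=
  let index := ix.1
  let currOddPre := PySem.List.pyGetD op index 0
  let currEvenPre := PySem.List.pyGetD ep index 0
  let currOddSuf := os - PySem.List.pyGetD op (index + 1) 0
  let currEvenSuf := es - PySem.List.pyGetD ep (index + 1) 0
  if currOddPre + currEvenSuf == currEvenPre + currOddSuf then answer + 1 else answer

def waysToMakeFair (nums : List Int) : Int :=
  let st := (PySem.List.enumerate nums 0).foldl stepA1 ([0], [0], 0, 0)
  (PySem.List.enumerate nums 0).foldl (stepA2 st.1 st.2.1 st.2.2.1 st.2.2.2) 0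

-- ===== PORT B =====
-- body of B's first loop: state (total, sign)
def stepBt (s : Int × Int) (x : Int) : Int × Int := (s.1 + s.2 * x, -s.2)

-- body of B's second loop: state (p, sign, answer)
def stepB (total : Int) (s : Int × Int × Int) (x : Int) : Int × Int × Int :=
  let p := s.1; let sign := s.2.1; let answer := s.2.2
  (p + sign * x, -sign, if 2 * p + sign * x == total then answer + 1 else answer)

def waysToMakeFair_alt (nums : List Int) : Int :=
  let total := (nums.foldl stepBt (0, 1)).1
  ((nums.foldl (stepB total) (0, 1, 0)).2.2)

-- ===== PRECONDITION & SPEC =====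
def Spec_waysToMakeFair (nums : List Int) (out : Int) : Prop := out = waysToMakeFair_alt nums
instance (nums : List Int) (out : Int) : Decidable (Spec_waysToMakeFair nums out) := by unfold Spec_waysToMakeFair; infer_instance

-- ===== CLAIM (what is proved, stated in full; the proofs are below) =====
def Claim_equal_waysToMakeFair : Prop := ∀ (nums : List Int), Dom_waysToMakeFair nums → Spec_waysToMakeFair nums (waysToMakeFair nums)

-- ===== LEMMAS AND PROOFS =====

-- parity of an index
def par (k : Int) : Bool := decide (PySem.Int.mod k 2 = 1)

-- the sign (+1 even position, -1 odd position) matching a parity flag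
def sgn (b : Bool) : Int := if b then -1 else 1

-- the entries A's first loop appends to oddPrefix, given start parity p and running sums a (odd), b (even)
def TO (p : Bool) (a b : Int) : List Int → List Int
  | [] => []
  | x :: l => if p then (a + x) :: TO (!p) (a + x) b l else a :: TO (!p) a (b + x) l

-- the entries A's first loop appends to evenPrefix
def TE (p : Bool) (a b : Int) : List Int → List Int
  | [] => []
  | x :: l => if p then b :: TE (!p) (a + x) b l else (b + x) :: TE (!p) a (b + x) l

-- sum of the elements sitting at a position whose parity flag is true, the first flag being p
def sumT (p : Bool) : List Int → Int
  | [] => 0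
  | x :: l => (if p then x else 0) + sumT (!p) l

-- A's second loop, re-expressed as a walk consuming the prefix lists in step with the input
def comb (os es : Int) : List Int → List Int → List Int → Int → Int
  | [], _, _, ans => ans
  | _ :: l, ops, eps, ans =>
      comb os es l (ops.drop 1) (eps.drop 1)
        (if ops.getD 0 0 + (es - eps.getD 1 0) == eps.getD 0 0 + (os - ops.getD 1 0) then ans + 1
         else ans)

theorem par_mod (k : Int) : (PySem.Int.mod k 2 != 0) = par k := by
  have h1 : 0 <= PySem.Int.mod k 2 := PySem.Int.mod_nonneg _ (by norm_num)
  have h2 : PySem.Int.mod k 2 < 2 := PySem.Int.mod_lt _ (by norm_num)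
  unfold par
  rw [Bool.eq_iff_iff]
  simp only [bne_iff_ne, ne_eq, decide_eq_true_eq]
  omega

theorem par_band (k : Int) : (PySem.Int.band k 1 != 0) = par k := by
  rw [PySem.Int.band_one]; exact par_mod k

theorem par_succ (k : Int) : par (k + 1) = !par k := by
  have e1 := PySem.Int.floordiv_mul_add_mod k 2
  have e2 := PySem.Int.floordiv_mul_add_mod (k + 1) 2
  have h1 : 0 <= PySem.Int.mod k 2 := PySem.Int.mod_nonneg _ (by norm_num)
  have h2 : PySem.Int.mod k 2 < 2 := PySem.Int.mod_lt _ (by norm_num)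
  have h3 : 0 <= PySem.Int.mod (k + 1) 2 := PySem.Int.mod_nonneg _ (by norm_num)
  have h4 : PySem.Int.mod (k + 1) 2 < 2 := PySem.Int.mod_lt _ (by norm_num)
  unfold par
  rw [Bool.eq_iff_iff]
  simp only [decide_eq_true_eq, Bool.not_eq_true', decide_eq_false_iff_not]
  omega

theorem beq_shift (a b c d : Int) (h : a - b = d - c) : (a == b) = (c == d) := by
  rw [Bool.eq_iff_iff]
  simp only [beq_iff_eq]
  omega

theorem getD_drop (xs : List Int) (k j : Nat) (d : Int) :
    (xs.drop k).getD j d = xs.getD (k + j) d := by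
  simp [List.getD, List.getElem?_drop]

theorem L_A1 (l : List Int) (k : Int) (op0 ep0 : List Int) (a b os es : Int) :
    (PySem.List.enumerate l k).foldl stepA1 (op0 ++ [a], ep0 ++ [b], os, es)
      = ((op0 ++ [a]) ++ TO (par k) a b l, (ep0 ++ [b]) ++ TE (par k) a b l,
         os + sumT (par k) l, es + sumT (!par k) l) := by
  induction l generalizing k op0 ep0 a b os es with
  | nil => simp [PySem.List.enumerate_nil, TO, TE, sumT]
  | cons x l ih =>
    rw [PySem.List.enumerate_cons]
    simp only [List.foldl_cons, stepA1, par_band, PySem.List.pyGetD_neg_one_append_singleton]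
    cases hp : par k <;>
      simp only [Bool.false_eq_true, if_false, if_true] <;>
      rw [ih, par_succ, hp] <;>
      simp [TO, TE, sumT, List.append_assoc] <;> ring

theorem L_A2 (l : List Int) (k : Nat) (op ep : List Int) (os es ans : Int) :
    (PySem.List.enumerate l (k : Int)).foldl (stepA2 op ep os es) ans
      = comb os es l (op.drop k) (ep.drop k) ans := by
  induction l generalizing k ans with
  | nil => simp [PySem.List.enumerate_nil, comb]
  | cons x l ih =>
    rw [PySem.List.enumerate_cons]
    have hc : (k : Int) + 1 = ((k + 1 : Nat) : Int) := by push_cast; ring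
    simp only [List.foldl_cons, stepA2, hc, PySem.List.pyGetD_natCast]
    rw [ih]
    simp only [comb, List.drop_drop, getD_drop]
    norm_num [Nat.add_comm]

-- B's first loop computes the alternating sum: total = (even-position sum) - (odd-position sum)
theorem L_Bt (l : List Int) (t s : Int) :
    (l.foldl stepBt (t, s)).1 = t + s * sumT true l - s * sumT false l := by
  induction l generalizing t s with
  | nil => simp [sumT]
  | cons x l ih =>
    simp only [List.foldl_cons, stepBt]
    rw [ih]
    simp [sumT]
    ring

theorem L_bridge (l : List Int) (k le lo os es ans : Int) :
    comb os es l (lo :: TO (par k) lo le l) (le :: TE (par k) lo le l) ans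
      = (l.foldl (stepB (es - os)) (le - lo, sgn (par k), ans)).2.2 := by
  induction l generalizing k le lo ans with
  | nil => simp [comb]
  | cons x l ih =>
    simp only [List.foldl_cons, stepB]
    cases hp : par k
    case false =>
      simp only [Bool.false_eq_true, TO, TE, if_false, comb, List.drop_succ_cons,
        List.drop_zero, List.getD_cons_zero, List.getD_cons_succ, sgn]
      rw [beq_shift (lo + (es - (le + x))) (le + (os - lo))
        (2 * (le - lo) + 1 * x) (es - os) (by ring)]
      have h := ih (k + 1) (le + x) lo
        (if 2 * (le - lo) + 1 * x == es - os then ans + 1 else ans)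
      rw [par_succ, hp] at h
      simp only [Bool.not_false, sgn, if_true] at h
      have harg : le + x - lo = le - lo + 1 * x := by ring
      rw [harg] at h
      exact h
    case true =>
      simp only [TO, TE, if_true, comb, List.drop_succ_cons,
        List.drop_zero, List.getD_cons_zero, List.getD_cons_succ, sgn]
      rw [beq_shift (lo + (es - le)) (le + (os - (lo + x)))
        (2 * (le - lo) + -1 * x) (es - os) (by ring)]
      have h := ih (k + 1) le (lo + x)
        (if 2 * (le - lo) + -1 * x == es - os then ans + 1 else ans)
      rw [par_succ, hp] at h
      simp only [Bool.not_true, sgn, Bool.false_eq_true, if_false] at h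
      have harg : le - (lo + x) = le - lo + -1 * x := by ring
      rw [harg] at h
      simp only [Bool.not_true, neg_neg]
      exact h

theorem par_zero : par 0 = false := by decide

theorem main_eq (nums : List Int) : waysToMakeFair nums = waysToMakeFair_alt nums := by
  have hA1 := L_A1 nums 0 [] [] 0 0 0 0
  rw [par_zero] at hA1
  simp only [List.nil_append, zero_add, Bool.not_false] at hA1
  have hA2 := L_A2 nums 0 ([0] ++ TO false 0 0 nums) ([0] ++ TE false 0 0 nums)
    (sumT false nums) (sumT true nums) 0
  simp only [Nat.cast_zero, List.drop_zero] at hA2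
  have hBt := L_Bt nums 0 1
  have hb := L_bridge nums 0 0 0 (sumT false nums) (sumT true nums) 0
  rw [par_zero] at hb
  simp only [sgn, Bool.false_eq_true, if_false, sub_zero] at hb
  unfold waysToMakeFair waysToMakeFair_alt
  simp only [hA1]
  rw [hA2]
  simp only [List.singleton_append]
  rw [hBt]
  have ht : (0 : Int) + 1 * sumT true nums - 1 * sumT false nums
      = sumT true nums - sumT false nums := by ring
  rw [ht]
  exact hb

-- ===== VERDICT (by name: the statement is the Claim_ definition above) =====
theorem waysToMakeFair_spec : Claim_equal_waysToMakeFair := by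
  intro nums _
  exact main_eq nums
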